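-- pv_equiv track=rewrite | github.com/d-krupke/cpsat-primer | build.py | replace_warning_boxes
-- ===== SOURCE A (Python) =====
-- def _create_pretty_warning_box(msg):
--     return f"""
-- <table style="width: 100%; border: 2px solid #ccc; border-radius: 8px; box-shadow: 0 2px 4px rgba(0, 0, 0, 0.1);">
-- <tr>
-- <td style="padding: 10px;">
-- <div style="display: flex; justify-content: space-between; align-items: center;">
--   <div style="width: 10%;">
--     <img src="https://raw.githubusercontent.com/d-krupke/cpsat-primer/main/images/warning_platypus.webp" alt="Description of image" style="width: 100%;">
--   </div>
--   <div style="width: 90%;">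
--
-- {msg}
--
--   </div>
-- </div>
--     </td>
--   </tr>
-- </table>
--     """
--
-- def replace_warning_boxes(content):
--     """
--     A warning box starts with `> :warning:` and ends with a line that does not start with `>`.
--     """
--     lines = content.split("\n")
--     new_content = ""
--     collect_warning = False
--     warning_msg = ""
--     for line in lines:
--         if line.startswith("> :warning:"):
--             collect_warning = True
--             warning_msg += line[len("> :warning:") :] + "\n"
--         elif line.startswith("> [!WARNING]"):
--             collect_warning = True
--             warning_msg += line[len("> [!WARNING]") :] + "\n"
--         elif collect_warning:
--             if line == ">":
--                 continue
--             if line.startswith("> "):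
--                 warning_msg += line[len("> ") :] + "\n"
--             else:
--                 new_content += _create_pretty_warning_box(warning_msg)
--                 new_content += "\n"
--                 collect_warning = False
--                 warning_msg = ""
--                 new_content += line + "\n"
--         else:
--             new_content += line + "\n"
--     return new_content
-- ===== SOURCE B (Python) =====
-- def _create_pretty_warning_box(msg):
--     return f"""
-- <table style="width: 100%; border: 2px solid #ccc; border-radius: 8px; box-shadow: 0 2px 4px rgba(0, 0, 0, 0.1);">
-- <tr>
-- <td style="padding: 10px;">
-- <div style="display: flex; justify-content: space-between; align-items: center;">
--   <div style="width: 10%;">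
--     <img src="https://raw.githubusercontent.com/d-krupke/cpsat-primer/main/images/warning_platypus.webp" alt="Description of image" style="width: 100%;">
--   </div>
--   <div style="width: 90%;">
--
-- {msg}
--
--   </div>
-- </div>
--     </td>
--   </tr>
-- </table>
--     """
--
-- def replace_warning_boxes(content):
--     """
--     A warning box starts with `> :warning:` and ends with a line that does not start with `>`.
--     Index-driven rewrite: an inner loop consumes a whole warning block at once;
--     a block that runs to EOF emits nothing (as the original does).
--     """
--     lines = content.split("\n")
--     out = []
--     i = 0
--     n = len(lines)
--     while i < n:
--         line = lines[i]
--         if line.startswith("> :warning:") or line.startswith("> [!WARNING]"):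
--             parts = []
--             while i < n:
--                 cur = lines[i]
--                 if cur.startswith("> :warning:"):
--                     parts.append(cur[len("> :warning:"):] + "\n")
--                 elif cur.startswith("> [!WARNING]"):
--                     parts.append(cur[len("> [!WARNING]"):] + "\n")
--                 elif cur == ">":
--                     pass
--                 elif cur.startswith("> "):
--                     parts.append(cur[len("> "):] + "\n")
--                 else:
--                     break
--                 i += 1
--             if i < n:
--                 out.append(_create_pretty_warning_box("".join(parts)))
--                 out.append("\n")
--                 out.append(lines[i] + "\n")
--                 i += 1
--         else:
--             out.append(line + "\n")
--             i += 1
--     return "".join(out)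
-- ===== Notes on version B (the rewrite author's own statement) =====
-- stated objective: alternative
-- what changed: Replaces the flag-carrying single fold (collect_warning boolean plus growing msg string) by an index-driven outer loop with a nested inner while-loop that consumes a whole warning block at once, collecting the stripped pieces in a list that is joined at the end.
import Mathlib
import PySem

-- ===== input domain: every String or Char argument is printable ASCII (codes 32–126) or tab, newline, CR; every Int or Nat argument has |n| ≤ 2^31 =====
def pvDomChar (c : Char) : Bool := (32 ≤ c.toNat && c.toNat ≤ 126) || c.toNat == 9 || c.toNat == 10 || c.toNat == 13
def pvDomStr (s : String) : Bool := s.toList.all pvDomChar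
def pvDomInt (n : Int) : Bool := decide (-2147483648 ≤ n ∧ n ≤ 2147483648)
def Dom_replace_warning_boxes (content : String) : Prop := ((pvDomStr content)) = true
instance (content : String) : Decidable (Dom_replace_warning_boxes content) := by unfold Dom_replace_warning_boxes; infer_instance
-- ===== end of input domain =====

-- B rewrites the flag-driven line scan as an index-driven loop whose inner loop consumes
-- a whole warning block at once, collecting pieces in a list joined at the end (objective: alternative decomposition).
-- ===== PORT A =====
def pvBoxPre : String := "\n<table style=\"width: 100%; border: 2px solid #ccc; border-radius: 8px; box-shadow: 0 2px 4px rgba(0, 0, 0, 0.1);\">\n<tr>\n<td style=\"padding: 10px;\">\n<div style=\"display: flex; justify-content: space-between; align-items: center;\">\n  <div style=\"width: 10%;\">\n    <img src=\"https://raw.githubusercontent.com/d-krupke/cpsat-primer/main/images/warning_platypus.webp\" alt=\"Description of image\" style=\"width: 100%;\">\n  </div>\n  <div style=\"width: 90%;\">\n\n"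
def pvBoxPost : String := "\n\n  </div>\n</div>\n    </td>\n  </tr>\n</table>\n    "

def pvBox (msg : String) : String := pvBoxPre ++ msg ++ pvBoxPost

def pvStepA (st : String × Bool × String) (line : String) : String × Bool × String :=
  let acc := st.1
  let collect := st.2.1
  let msg := st.2.2
  if PySem.Str.startswith line "> :warning:" then
    (acc, true, msg ++ PySem.Str.slice line (some 11) none ++ "\n")
  else if PySem.Str.startswith line "> [!WARNING]" then
    (acc, true, msg ++ PySem.Str.slice line (some 12) none ++ "\n")
  else if collect then
    if line == ">" then (acc, collect, msg)
    else if PySem.Str.startswith line "> " then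
      (acc, collect, msg ++ PySem.Str.slice line (some 2) none ++ "\n")
    else (acc ++ pvBox msg ++ "\n" ++ (line ++ "\n"), false, "")
  else (acc ++ line ++ "\n", collect, msg)

def replace_warning_boxes (content : String) : String :=
  (((PySem.Str.split? content "\n").getD []).foldl pvStepA ("", false, "")).1

-- ===== PORT B =====
mutual
-- outer while-loop of B: lines not yet consumed → output pieces
def pvOuterB : List String → List String
  | [] => []
  | line :: rest =>
    if PySem.Str.startswith line "> :warning:" || PySem.Str.startswith line "> [!WARNING]" then
      pvInnerB (line :: rest) []
    else (line ++ "\n") :: pvOuterB rest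
  termination_by xs => (xs.length, 1)
-- inner while-loop of B: consumes a warning block, accumulating its stripped pieces
def pvInnerB : List String → List String → List String
  | [], _ => []
  | cur :: rest, parts =>
    if PySem.Str.startswith cur "> :warning:" then
      pvInnerB rest (parts ++ [PySem.Str.slice cur (some 11) none ++ "\n"])
    else if PySem.Str.startswith cur "> [!WARNING]" then
      pvInnerB rest (parts ++ [PySem.Str.slice cur (some 12) none ++ "\n"])
    else if cur == ">" then pvInnerB rest parts
    else if PySem.Str.startswith cur "> " then
      pvInnerB rest (parts ++ [PySem.Str.slice cur (some 2) none ++ "\n"])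
    else pvBox (PySem.Str.join "" parts) :: "\n" :: (cur ++ "\n") :: pvOuterB rest
  termination_by xs _ => (xs.length, 0)
end

def replace_warning_boxes_alt (content : String) : String :=
  PySem.Str.join "" (pvOuterB ((PySem.Str.split? content "\n").getD []))

-- ===== PRECONDITION & SPEC =====
def Spec_replace_warning_boxes (content : String) (out : String) : Prop := out = replace_warning_boxes_alt content
instance (content : String) (out : String) : Decidable (Spec_replace_warning_boxes content out) := by unfold Spec_replace_warning_boxes; infer_instance

-- ===== CLAIM (what is proved, stated in full; the proofs are below) =====
def Claim_equal_replace_warning_boxes : Prop := ∀ (content : String), Dom_replace_warning_boxes content → Spec_replace_warning_boxes content (replace_warning_boxes content)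

-- ===== LEMMAS AND PROOFS =====
theorem pvJoin_nil : PySem.Str.join "" ([] : List String) = "" := by
  simp [PySem.Str.join, PySem.Chars.join_nil]

theorem pvJoin_cons (x : String) (l : List String) :
    PySem.Str.join "" (x :: l) = x ++ PySem.Str.join "" l := by
  simp only [PySem.Str.join, String.toList_empty, List.map_cons]
  cases l with
  | nil => simp [PySem.Chars.join_singleton]
  | cons h t => simp [PySem.Chars.join_cons_cons, String.ofList_append]

theorem pvJoin_snoc (l : List String) (y : String) :
    PySem.Str.join "" (l ++ [y]) = PySem.Str.join "" l ++ y := by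
  induction l with
  | nil => simp [pvJoin_nil, pvJoin_cons]
  | cons h t ih => simp [pvJoin_cons, ih, String.append_assoc]

theorem pvMain (lines : List String) :
    (∀ acc : String,
      (lines.foldl pvStepA (acc, false, "")).1 = acc ++ PySem.Str.join "" (pvOuterB lines)) ∧
    (∀ (acc : String) (parts : List String),
      (lines.foldl pvStepA (acc, true, PySem.Str.join "" parts)).1
        = acc ++ PySem.Str.join "" (pvInnerB lines parts)) := by
  induction lines with
  | nil =>
    refine ⟨fun acc => ?_, fun acc parts => ?_⟩
    · simp [pvOuterB, pvJoin_nil]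
    · simp [pvInnerB, pvJoin_nil]
  | cons line rest ih =>
    obtain ⟨ihO, ihI⟩ := ih
    refine ⟨fun acc => ?_, fun acc parts => ?_⟩
    · by_cases h1 : PySem.Chars.startswith line.toList ['>', ' ', ':', 'w', 'a', 'r', 'n', 'i', 'n', 'g', ':'] = true
      · have h := ihI acc [PySem.Str.slice line (some 11) none ++ "\n"]
        simp only [pvJoin_cons, pvJoin_nil, String.append_empty] at h
        simp [pvStepA, pvOuterB, pvInnerB, h1, h]
      · by_cases h2 : PySem.Chars.startswith line.toList ['>', ' ', '[', '!', 'W', 'A', 'R', 'N', 'I', 'N', 'G', ']'] = true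
        · have h := ihI acc [PySem.Str.slice line (some 12) none ++ "\n"]
          simp only [pvJoin_cons, pvJoin_nil, String.append_empty] at h
          simp [pvStepA, pvOuterB, pvInnerB, h1, h2, h]
        · have h := ihO (acc ++ line ++ "\n")
          simp only [String.append_assoc] at h
          simp [pvStepA, pvOuterB, h1, h2, h, pvJoin_cons, String.append_assoc]
    · by_cases h1 : PySem.Chars.startswith line.toList ['>', ' ', ':', 'w', 'a', 'r', 'n', 'i', 'n', 'g', ':'] = true
      · have h := ihI acc (parts ++ [PySem.Str.slice line (some 11) none ++ "\n"])
        simp only [pvJoin_snoc, String.append_assoc] at h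
        simp [pvStepA, pvInnerB, h1, h, String.append_assoc]
      · by_cases h2 : PySem.Chars.startswith line.toList ['>', ' ', '[', '!', 'W', 'A', 'R', 'N', 'I', 'N', 'G', ']'] = true
        · have h := ihI acc (parts ++ [PySem.Str.slice line (some 12) none ++ "\n"])
          simp only [pvJoin_snoc, String.append_assoc] at h
          simp [pvStepA, pvInnerB, h1, h2, h, String.append_assoc]
        · by_cases h3 : line = ">"
          · have h := ihI acc parts
            simp [pvStepA, pvInnerB, h3, h,
              show PySem.Chars.startswith ['>'] ['>', ' ', ':', 'w', 'a', 'r', 'n', 'i', 'n', 'g', ':'] = false from rfl,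
              show PySem.Chars.startswith ['>'] ['>', ' ', '[', '!', 'W', 'A', 'R', 'N', 'I', 'N', 'G', ']'] = false from rfl]
          · by_cases h4 : PySem.Chars.startswith line.toList ['>', ' '] = true
            · have h := ihI acc (parts ++ [PySem.Str.slice line (some 2) none ++ "\n"])
              simp only [pvJoin_snoc, String.append_assoc] at h
              simp [pvStepA, pvInnerB, h1, h2, h3, h4, h, String.append_assoc]
            · have h := ihO (acc ++ pvBox (PySem.Str.join "" parts) ++ "\n" ++ (line ++ "\n"))
              simp only [String.append_assoc] at h
              simp [pvStepA, pvInnerB, h1, h2, h3, h4, h, pvJoin_cons, String.append_assoc]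

-- ===== VERDICT (by name: the statement is the Claim_ definition above) =====
theorem replace_warning_boxes_spec : Claim_equal_replace_warning_boxes := by
  intro content _
  unfold Spec_replace_warning_boxes replace_warning_boxes replace_warning_boxes_alt
  simpa using (pvMain ((PySem.Str.split? content "\n").getD [])).1 ""
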